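-- pv_equiv track=rewrite | github.com/BugBustersUnipd/DocumentazioneSWE | assets/macro/Da_TEX_a_JSON.py | compare_glossaries
-- ===== SOURCE A (Python) =====
-- def compare_glossaries(old_dict, new_dict):
--     """Confronta due glossari e restituisce differenze"""
--     added = []
--     modified = []
--     removed = []
--     unchanged = []
--
--     # Termini nuovi o modificati
--     for term, definition in new_dict.items():
--         if term not in old_dict:
--             added.append(term)
--         elif old_dict[term] != definition:
--             modified.append(term)
--         else:
--             unchanged.append(term)
--
--     # Termini rimossi
--     for term in old_dict:
--         if term not in new_dict:
--             removed.append(term)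
--
--     return {
--         'added': sorted(added, key=str.lower),
--         'modified': sorted(modified, key=str.lower),
--         'removed': sorted(removed, key=str.lower),
--         'unchanged': sorted(unchanged, key=str.lower)
--     }
-- ===== SOURCE B (Python) =====
-- def compare_glossaries(old_dict, new_dict):
--     """Confronta due glossari e restituisce differenze"""
--     new_sorted = sorted(new_dict, key=str.lower)
--     old_sorted = sorted(old_dict, key=str.lower)
--     added = [t for t in new_sorted if t not in old_dict]
--     removed = [t for t in old_sorted if t not in new_dict]
--     common = [t for t in new_sorted if t in old_dict]
--     modified = [t for t in common if old_dict[t] != new_dict[t]]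
--     unchanged = [t for t in common if old_dict[t] == new_dict[t]]
--     return {
--         'added': added,
--         'modified': modified,
--         'removed': removed,
--         'unchanged': unchanged
--     }
-- ===== Notes on version B (the rewrite author's own statement) =====
-- stated objective: alternative
-- what changed: A classifies keys in one branching pass over new_dict (and a second over old_dict) into four lists and then sorts each of the four; B sorts each dict's keys once up front and derives the four lists as independent filter comprehensions (set-difference / intersection style) over the pre-sorted key lists, relying on stable sorting commuting with filtering.
import Mathlib
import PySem

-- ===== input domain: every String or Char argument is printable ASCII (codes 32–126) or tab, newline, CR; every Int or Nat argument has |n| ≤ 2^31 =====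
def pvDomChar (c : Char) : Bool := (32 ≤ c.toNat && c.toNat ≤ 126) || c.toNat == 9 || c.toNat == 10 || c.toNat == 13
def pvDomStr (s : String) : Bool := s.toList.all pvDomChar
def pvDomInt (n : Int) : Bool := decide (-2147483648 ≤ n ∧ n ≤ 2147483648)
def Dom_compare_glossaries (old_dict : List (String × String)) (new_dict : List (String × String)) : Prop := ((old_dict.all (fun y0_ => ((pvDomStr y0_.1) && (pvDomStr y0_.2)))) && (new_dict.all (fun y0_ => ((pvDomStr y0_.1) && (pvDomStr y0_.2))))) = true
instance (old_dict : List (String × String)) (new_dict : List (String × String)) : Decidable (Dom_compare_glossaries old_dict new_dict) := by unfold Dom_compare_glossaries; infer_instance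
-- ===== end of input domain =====

-- B sorts each dict's key list once up front and derives the four categories as independent
-- filters over the pre-sorted keys, instead of A's classify-then-sort-four-lists pass
-- (objective: alternative decomposition, same asymptotic cost).


-- ===== PORT A =====
-- Python receives dict arguments: the association lists are read as dicts (last value wins,
-- first position kept), exactly CPython's dict construction; PySem.Dict.ofList is that.
def compare_glossaries (old_dict : List (String × String)) (new_dict : List (String × String)) : List (String × List String) :=
  let oldD : PySem.Dict String String := PySem.Dict.ofList old_dict
  let newD : PySem.Dict String String := PySem.Dict.ofList new_dict
  -- for term, definition in new_dict.items(): the three-way branch, three accumulator lists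
  let tri := newD.items.foldl
    (fun (s : List String × List String × List String) p =>
      if oldD.contains p.1 = false then (s.1 ++ [p.1], s.2.1, s.2.2)
      -- old_dict[term]: the lookup is guarded by the branch above, so getD with any default is exact
      else if (oldD.getD p.1 "" != p.2) then (s.1, s.2.1 ++ [p.1], s.2.2)
      else (s.1, s.2.1, s.2.2 ++ [p.1]))
    ([], [], [])
  -- for term in old_dict: if term not in new_dict: removed.append(term)
  let removed := oldD.keys.foldl (fun acc t => if newD.contains t = false then acc ++ [t] else acc) []
  [("added", PySem.List.sorted tri.1 PySem.Str.lower),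
   ("modified", PySem.List.sorted tri.2.1 PySem.Str.lower),
   ("removed", PySem.List.sorted removed PySem.Str.lower),
   ("unchanged", PySem.List.sorted tri.2.2 PySem.Str.lower)]

-- ===== PORT B =====
def compare_glossaries_alt (old_dict : List (String × String)) (new_dict : List (String × String)) : List (String × List String) :=
  let oldD : PySem.Dict String String := PySem.Dict.ofList old_dict
  let newD : PySem.Dict String String := PySem.Dict.ofList new_dict
  let newSorted := PySem.List.sorted newD.keys PySem.Str.lower
  let oldSorted := PySem.List.sorted oldD.keys PySem.Str.lower
  let added := newSorted.filter (fun t => !oldD.contains t)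
  let removed := oldSorted.filter (fun t => !newD.contains t)
  let common := newSorted.filter (fun t => oldD.contains t)
  -- old_dict[t] / new_dict[t]: both lookups guarded by membership (common), so getD is exact
  let modified := common.filter (fun t => oldD.getD t "" != newD.getD t "")
  let unchanged := common.filter (fun t => oldD.getD t "" == newD.getD t "")
  [("added", added), ("modified", modified), ("removed", removed), ("unchanged", unchanged)]

-- ===== PRECONDITION & SPEC =====
def Spec_compare_glossaries (old_dict : List (String × String)) (new_dict : List (String × String)) (out : List (String × List String)) : Prop := out = compare_glossaries_alt old_dict new_dict
instance (old_dict : List (String × String)) (new_dict : List (String × String)) (out : List (String × List String)) : Decidable (Spec_compare_glossaries old_dict new_dict out) := by unfold Spec_compare_glossaries; infer_instance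

-- ===== CLAIM (what is proved, stated in full; the proofs are below) =====
def Claim_equal_compare_glossaries : Prop := ∀ (old_dict : List (String × String)) (new_dict : List (String × String)), Dom_compare_glossaries old_dict new_dict → Spec_compare_glossaries old_dict new_dict (compare_glossaries old_dict new_dict)

-- ===== LEMMAS AND PROOFS =====


theorem insertBy_of_forall_before {α : Type} (before : α → α → Bool) (x : α) (ys : List α)
    (h : ∀ y ∈ ys, before x y = true) : PySem.List.insertBy before x ys = x :: ys := by
  cases ys with
  | nil => rfl
  | cons y ys => simp [PySem.List.insertBy, h y (by simp)]

theorem insertBy_filter {α κ : Type} [LinearOrder κ] (key : α → κ) (p : α → Bool) (x : α) :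
    ∀ acc : List α, acc.Pairwise (fun a b => key a ≤ key b) →
      (PySem.List.insertBy (fun a b => decide (key a < key b)) x acc).filter p
        = if p x then PySem.List.insertBy (fun a b => decide (key a < key b)) x (acc.filter p)
          else acc.filter p := by
  intro acc
  induction acc with
  | nil => intro _; by_cases hpx : p x <;> simp [PySem.List.insertBy, List.filter, hpx]
  | cons y ys ih =>
    intro hpair
    obtain ⟨hhead, hys⟩ := List.pairwise_cons.mp hpair
    by_cases hxy : key x < key y
    · rw [show PySem.List.insertBy (fun a b => decide (key a < key b)) x (y :: ys)
            = x :: y :: ys by simp [PySem.List.insertBy, hxy]]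
      by_cases hpx : p x
      · by_cases hpy : p y
        · simp [hpx, hpy, PySem.List.insertBy, hxy]
        · simp only [List.filter_cons, hpx, hpy, if_pos, Bool.false_eq_true]
          rw [insertBy_of_forall_before]
          intro z hz
          have hzy : key y ≤ key z := hhead z (List.mem_of_mem_filter hz)
          simp [lt_of_lt_of_le hxy hzy]
      · simp [List.filter_cons, hpx]
    · rw [show PySem.List.insertBy (fun a b => decide (key a < key b)) x (y :: ys)
            = y :: PySem.List.insertBy (fun a b => decide (key a < key b)) x ys by
          simp [PySem.List.insertBy, hxy]]
      by_cases hpy : p y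
      · simp only [List.filter_cons, hpy, if_true, ih hys]
        by_cases hpx : p x
        · simp only [hpx, if_true]
          rw [show PySem.List.insertBy (fun a b => decide (key a < key b)) x (y :: List.filter p ys)
                = y :: PySem.List.insertBy (fun a b => decide (key a < key b)) x (List.filter p ys) by
              simp [PySem.List.insertBy, hxy]]
        · simp [hpx]
      · rw [List.filter_cons_of_neg (by simpa using hpy), List.filter_cons_of_neg (by simpa using hpy),
            ih hys]

theorem sorted_filter {α κ : Type} [LinearOrder κ] (key : α → κ) (p : α → Bool) (xs : List α) :
    (PySem.List.sorted xs key).filter p = PySem.List.sorted (xs.filter p) key := by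
  induction xs using List.reverseRecOn with
  | nil => rfl
  | append_singleton xs x ih =>
    have hstep : ∀ (l : List α) (z : α), PySem.List.sorted (l ++ [z]) key
        = PySem.List.insertBy (fun a b => decide (key a < key b)) z (PySem.List.sorted l key) := by
      intro l z
      rw [PySem.List.sorted_eq_foldl_insertBy, PySem.List.sorted_eq_foldl_insertBy, List.foldl_append]
      rfl
    rw [hstep, insertBy_filter key p x _ (PySem.List.sorted_pairwise xs key), List.filter_append]
    by_cases hpx : p x
    · simp [hpx, hstep, ih]
    · simp [hpx, ih]

theorem ports_agree (old_dict new_dict : List (String × String)) :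
    compare_glossaries old_dict new_dict = compare_glossaries_alt old_dict new_dict := by
  show _ = _
  simp only [compare_glossaries, compare_glossaries_alt]
  set oldD : PySem.Dict String String := PySem.Dict.ofList old_dict with hod
  set newD : PySem.Dict String String := PySem.Dict.ofList new_dict with hnd
  -- A's classification loop, rewritten componentwise with tests on the key only
  have hcongr : newD.items.foldl
      (fun (s : List String × List String × List String) p =>
        if oldD.contains p.1 = false then (s.1 ++ [p.1], s.2.1, s.2.2)
        else if (oldD.getD p.1 "" != p.2) then (s.1, s.2.1 ++ [p.1], s.2.2)
        else (s.1, s.2.1, s.2.2 ++ [p.1])) ([], [], [])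
    = newD.items.foldl
      (fun (s : List String × List String × List String) p =>
        (if !oldD.contains p.1 then s.1 ++ [p.1] else s.1,
         if oldD.contains p.1 && (oldD.getD p.1 "" != newD.getD p.1 "") then s.2.1 ++ [p.1] else s.2.1,
         if oldD.contains p.1 && (oldD.getD p.1 "" == newD.getD p.1 "") then s.2.2 ++ [p.1] else s.2.2))
      ([], [], []) := by
    apply PySem.List.foldl_congr_mem
    intro s p hp
    have hv : newD.getD p.1 "" = p.2 :=
      PySem.Dict.getD_of_mem_items newD (by simpa using hp) (by rw [hnd]; exact PySem.Dict.nodup_keys_ofList _) ""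
    rw [hv]
    by_cases hc : oldD.contains p.1
    · by_cases hne : oldD.getD p.1 "" == p.2 <;> simp [hc, hne, bne]
    · simp [Bool.not_eq_true] at hc
      simp [hc]
  rw [hcongr]
  rw [PySem.List.foldl_prod_mk
        (f := fun s1 (p : String × String) => if !oldD.contains p.1 then s1 ++ [p.1] else s1)
        (g := fun (s2 : List String × List String) p =>
          (if oldD.contains p.1 && (oldD.getD p.1 "" != newD.getD p.1 "") then s2.1 ++ [p.1] else s2.1,
           if oldD.contains p.1 && (oldD.getD p.1 "" == newD.getD p.1 "") then s2.2 ++ [p.1] else s2.2))]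
  rw [PySem.List.foldl_prod_mk
        (f := fun s1 (p : String × String) => if oldD.contains p.1 && (oldD.getD p.1 "" != newD.getD p.1 "") then s1 ++ [p.1] else s1)
        (g := fun s2 (p : String × String) => if oldD.contains p.1 && (oldD.getD p.1 "" == newD.getD p.1 "") then s2 ++ [p.1] else s2)]
  rw [PySem.List.foldl_append_if (fun p : String × String => !oldD.contains p.1) Prod.fst,
      PySem.List.foldl_append_if (fun p : String × String => oldD.contains p.1 && (oldD.getD p.1 "" != newD.getD p.1 "")) Prod.fst,
      PySem.List.foldl_append_if (fun p : String × String => oldD.contains p.1 && (oldD.getD p.1 "" == newD.getD p.1 "")) Prod.fst,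
      PySem.List.foldl_append_ite_eq_filter (fun t => newD.contains t = false)]
  simp only [List.nil_append]
  -- map fst ∘ filter-on-fst = filter on keys
  have hmf : ∀ (q : String → Bool) (l : List (String × String)),
      (l.filter (fun p => q p.1)).map Prod.fst = (l.map Prod.fst).filter q := by
    intro q l
    induction l with
    | nil => rfl
    | cons x xs ih => by_cases h : q x.1 <;> simp [h, ih]
  have hkeys : ∀ (d : PySem.Dict String String), d.items.map Prod.fst = d.keys := by
    intro d; rfl
  rw [hmf (fun t => !oldD.contains t) newD.items,
      hmf (fun t => oldD.contains t && (oldD.getD t "" != newD.getD t "")) newD.items,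
      hmf (fun t => oldD.contains t && (oldD.getD t "" == newD.getD t "")) newD.items,
      hkeys newD]
  -- B side: pull the filters inside the sorts
  rw [List.filter_filter, List.filter_filter]
  have hrem : List.filter (fun x => decide (newD.contains x = false)) oldD.keys
      = List.filter (fun t => !newD.contains t) oldD.keys :=
    List.filter_congr (fun t _ => by simp)
  have hswap1 : List.filter (fun a => (oldD.getD a "" != newD.getD a "") && oldD.contains a)
        (PySem.List.sorted newD.keys PySem.Str.lower)
      = List.filter (fun t => oldD.contains t && (oldD.getD t "" != newD.getD t ""))
        (PySem.List.sorted newD.keys PySem.Str.lower) :=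
    List.filter_congr (fun t _ => Bool.and_comm _ _)
  have hswap2 : List.filter (fun a => (oldD.getD a "" == newD.getD a "") && oldD.contains a)
        (PySem.List.sorted newD.keys PySem.Str.lower)
      = List.filter (fun t => oldD.contains t && (oldD.getD t "" == newD.getD t ""))
        (PySem.List.sorted newD.keys PySem.Str.lower) :=
    List.filter_congr (fun t _ => Bool.and_comm _ _)
  rw [hrem, hswap1, hswap2,
      ← sorted_filter PySem.Str.lower (fun t => !oldD.contains t) newD.keys,
      ← sorted_filter PySem.Str.lower (fun t => !newD.contains t) oldD.keys,
      ← sorted_filter PySem.Str.lower (fun t => oldD.contains t && (oldD.getD t "" != newD.getD t "")) newD.keys,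
      ← sorted_filter PySem.Str.lower (fun t => oldD.contains t && (oldD.getD t "" == newD.getD t "")) newD.keys]

-- ===== VERDICT (by name: the statement is the Claim_ definition above) =====
theorem compare_glossaries_spec : Claim_equal_compare_glossaries := by
  intro old_dict new_dict _
  unfold Spec_compare_glossaries
  exact ports_agree old_dict new_dict
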